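-- pv_equiv track=rewrite | github.com/AparaV/rashomon-partition-sets | Code/rashomon/extract_pools.py | __aggregate_pools__
-- ===== SOURCE A (Python) =====
-- def __aggregate_pools__(pi_policies: dict[int, dict[int, int]]) -> tuple[dict, dict]:
--     """
--     Aggregate partitions across multiple profiles into a unified ID numbering system
--     Assumes that policy IDs are already universalized.
--
--     Arguments:
--     pi_policies (dict[int, dict[int, int]]): key = profile_id, value = dictionary
--         pi_policies[k]: key = universal policy_id
--                         value = pool_id within profile k
--
--     Returns:
--     (agg_pi_pools, agg_pi_policies): Aggregated pools and policies
--         agg_pi_pools (dict[int, list[int]]): Key = pool_id, Value = List of policy_id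
--         agg_pi_policies (dict[int, int]): Key = policy_id, Value = pool_id
--     """
--     agg_pi_policies: dict[int, int] = {}
--     agg_pi_pools: dict[int, list[int]] = {}
--     pool_ctr = 0
--     for k, pi_policies_k in pi_policies.items():
--         pool_id_map = {}
--         for pol_id, pool_id in pi_policies_k.items():
--             if pool_id is None:
--                 continue
--             try:
--                 agg_pool_id = pool_id_map[pool_id]
--             except KeyError:
--                 agg_pool_id = pool_ctr
--                 agg_pi_pools[agg_pool_id] = []
--                 pool_id_map[pool_id] = agg_pool_id
--                 pool_ctr += 1
--             agg_pi_policies[pol_id] = agg_pool_id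
--             agg_pi_pools[agg_pool_id].append(pol_id)
--
--     return (agg_pi_pools, agg_pi_policies)
-- ===== SOURCE B (Python) =====
-- def _group_by_pool(pi_policies_k):
--     """Ordered grouping of policy ids by their local pool id; None pool ids are dropped."""
--     groups = {}
--     for pol_id, pool_id in pi_policies_k.items():
--         if pool_id is not None:
--             groups.setdefault(pool_id, []).append(pol_id)
--     return groups
--
--
-- def __aggregate_pools__(pi_policies):
--     # pass 1: per profile, group policy ids by local pool id (first-appearance order)
--     per_profile_groups = [_group_by_pool(v) for v in pi_policies.values()]
--     # pass 2a: number the groups sequentially across all profiles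
--     agg_pi_pools = {agg_id: members
--                     for agg_id, members in enumerate(members
--                                                      for groups in per_profile_groups
--                                                      for members in groups.values())}
--     # pass 2b: map each policy to its group's aggregate id, in the original scan order
--     agg_pi_policies = {}
--     base = 0
--     for pi_policies_k, groups in zip(pi_policies.values(), per_profile_groups):
--         local_to_agg = {pool_id: base + i for i, pool_id in enumerate(groups)}
--         for pol_id, pool_id in pi_policies_k.items():
--             if pool_id is not None:
--                 agg_pi_policies[pol_id] = local_to_agg[pool_id]
--         base += len(groups)
--     return (agg_pi_pools, agg_pi_policies)
-- ===== Notes on version B (the rewrite author's own statement) =====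
-- stated objective: alternative
-- what changed: A's single interleaved scan with try/except-driven on-demand pool numbering is split into two passes: first an order-preserving grouping of policy ids by local pool id per profile, then a numbering pass that assigns sequential aggregate ids from the group positions and populates both output dicts.
import Mathlib
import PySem

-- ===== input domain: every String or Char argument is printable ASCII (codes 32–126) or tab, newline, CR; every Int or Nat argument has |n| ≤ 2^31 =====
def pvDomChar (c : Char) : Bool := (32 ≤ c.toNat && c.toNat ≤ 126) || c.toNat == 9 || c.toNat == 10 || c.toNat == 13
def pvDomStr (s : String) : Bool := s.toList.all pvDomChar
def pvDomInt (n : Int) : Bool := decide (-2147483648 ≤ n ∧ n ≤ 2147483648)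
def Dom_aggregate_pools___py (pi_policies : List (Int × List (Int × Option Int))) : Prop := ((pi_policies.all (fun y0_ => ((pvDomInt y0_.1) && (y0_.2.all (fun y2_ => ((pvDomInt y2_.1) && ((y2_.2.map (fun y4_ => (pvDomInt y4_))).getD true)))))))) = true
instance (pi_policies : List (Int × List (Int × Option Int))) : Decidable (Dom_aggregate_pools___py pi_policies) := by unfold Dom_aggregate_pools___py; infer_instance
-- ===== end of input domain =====

-- B splits A's single interleaved scan (with try/except-driven on-demand numbering) into a
-- grouping pass per profile followed by a numbering/population pass; same cost, alternative structure.

-- ===== PORT A =====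
-- one iteration of A's inner loop; state = (agg_pi_pools, agg_pi_policies, pool_ctr, pool_id_map)
def pvStepA (st : PySem.Dict Int (List Int) × PySem.Dict Int Int × Int × PySem.Dict Int Int)
    (e : Int × Option Int) :
    PySem.Dict Int (List Int) × PySem.Dict Int Int × Int × PySem.Dict Int Int :=
  match e.2 with
  | none => st                                    -- 'if pool_id is None: continue'
  | some pool_id =>
    match st with
    | (pools, policies, ctr, m) =>
      match m.get? pool_id with                   -- 'try: agg_pool_id = pool_id_map[pool_id]'
      | some agg =>
          (pools.modify agg [] (fun l => l ++ [e.1]), policies.insert e.1 agg, ctr, m)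
      | none =>                                   -- 'except KeyError'
          ((pools.insert ctr []).modify ctr [] (fun l => l ++ [e.1]),
           policies.insert e.1 ctr, ctr + 1, m.insert pool_id ctr)

def aggregate_pools___py (pi_policies : List (Int × List (Int × Option Int))) :
    (List (Int × List Int)) × (List (Int × Int)) :=
  let fin := pi_policies.foldl
    (fun (st : PySem.Dict Int (List Int) × PySem.Dict Int Int × Int) kv =>
      let r := kv.2.foldl pvStepA (st.1, st.2.1, st.2.2, PySem.Dict.empty)
      (r.1, r.2.1, r.2.2.1))
    (PySem.Dict.empty, PySem.Dict.empty, 0)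
  (fin.1.items, fin.2.1.items)

-- ===== PORT B =====
-- pass 1 helper: ordered grouping of policy ids by local pool id, dropping None
-- ('groups.setdefault(pool_id, []).append(pol_id)' is Dict.modify pool_id [] (· ++ [pol_id]))
def pvGroupByPool (es : List (Int × Option Int)) : PySem.Dict Int (List Int) :=
  es.foldl (fun g e =>
    match e.2 with
    | none => g
    | some pool_id => g.modify pool_id [] (fun l => l ++ [e.1])) PySem.Dict.empty

-- '{pool_id: base + i for i, pool_id in enumerate(groups)}'
def pvLocalToAgg (base : Int) (g : PySem.Dict Int (List Int)) : PySem.Dict Int Int :=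
  PySem.Dict.ofList ((PySem.List.enumerate g.keys).map (fun p => (p.2, base + p.1)))

def aggregate_pools___py_alt (pi_policies : List (Int × List (Int × Option Int))) :
    (List (Int × List Int)) × (List (Int × Int)) :=
  let gs := pi_policies.map (fun kv => pvGroupByPool kv.2)
  -- pass 2a: '{agg_id: members for agg_id, members in enumerate(...)}'
  let pools := PySem.Dict.ofList
    (PySem.List.enumerate (gs.flatMap (fun g => g.values)))
  -- pass 2b: walk the original entries again with each profile's local_to_agg map
  -- ('agg_pi_policies[pol_id] = local_to_agg[pool_id]'; the key is always present, so getD is exact)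
  let fin := ((pi_policies.map (fun kv => kv.2)).zip gs).foldl
    (fun (st : PySem.Dict Int Int × Int) pg =>
      let m := pvLocalToAgg st.2 pg.2
      (pg.1.foldl (fun q e =>
         match e.2 with
         | none => q
         | some pool_id => q.insert e.1 (m.getD pool_id 0)) st.1,
       st.2 + (pg.2.size : Int)))
    (PySem.Dict.empty, 0)
  (pools.items, fin.1.items)

-- ===== PRECONDITION & SPEC =====
def Spec_aggregate_pools___py (pi_policies : List (Int × List (Int × Option Int))) (out : (List (Int × List Int)) × (List (Int × Int))) : Prop := out = aggregate_pools___py_alt pi_policies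
instance (pi_policies : List (Int × List (Int × Option Int))) (out : (List (Int × List Int)) × (List (Int × Int))) : Decidable (Spec_aggregate_pools___py pi_policies out) := by unfold Spec_aggregate_pools___py; infer_instance

-- ===== CLAIM (what is proved, stated in full; the proofs are below) =====
def Claim_equal_aggregate_pools___py : Prop := ∀ (pi_policies : List (Int × List (Int × Option Int))), Dom_aggregate_pools___py pi_policies → Spec_aggregate_pools___py pi_policies (aggregate_pools___py pi_policies)

-- ===== LEMMAS AND PROOFS =====

-- list-level model of one grouping step ('append to the group of pool, or open a new group')
def pvUpdL (L : List (Int × List Int)) (pool pol : Int) : List (Int × List Int) :=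
  if pool ∈ L.map Prod.fst then
    L.map (fun p => if p.1 = pool then (p.1, p.2 ++ [pol]) else p)
  else L ++ [(pool, [pol])]

def pvGrpL (L : List (Int × List Int)) (es : List (Int × Option Int)) : List (Int × List Int) :=
  es.foldl (fun L e =>
    match e.2 with
    | none => L
    | some pool => pvUpdL L pool e.1) L

-- the pools produced from groups L, numbered from c0
def pvNumL (c0 : Int) (L : List (Int × List Int)) : List (Int × List Int) :=
  PySem.List.enumerate (L.map Prod.snd) c0

-- the local_pool -> aggregate id map, as an association list
def pvMapF (c0 : Int) (ks : List Int) : List (Int × Int) :=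
  (PySem.List.enumerate ks).map (fun p => (p.2, c0 + p.1))

-- position of the first occurrence
def pvPos : List Int → Int → Option Nat
  | [], _ => none
  | k :: t, x => if k = x then some 0 else (pvPos t x).map (· + 1)

def pvPolUpdL (m : List (Int × Int)) (Q : PySem.Dict Int Int) (es : List (Int × Option Int)) :
    PySem.Dict Int Int :=
  es.foldl (fun q e =>
    match e.2 with
    | none => q
    | some pool_id => q.insert e.1 ((PySem.Dict.mk m).getD pool_id 0)) Q

def pvPoolsL (c0 : Int) : List (Int × List (Int × Option Int)) → List (Int × List Int)
  | [] => []
  | kv :: t => pvNumL c0 (pvGrpL [] kv.2) ++ pvPoolsL (c0 + ((pvGrpL [] kv.2).length : Int)) t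

def pvPolAll (Q : PySem.Dict Int Int) (c0 : Int) :
    List (Int × List (Int × Option Int)) → PySem.Dict Int Int
  | [] => Q
  | kv :: t => pvPolAll (pvPolUpdL (pvMapF c0 ((pvGrpL [] kv.2).map Prod.fst)) Q kv.2)
      (c0 + ((pvGrpL [] kv.2).length : Int)) t

def pvTot : List (Int × List (Int × Option Int)) → Nat
  | [] => 0
  | kv :: t => (pvGrpL [] kv.2).length + pvTot t

-- ---- enumerate facts ----
lemma pv_enum_cons {α : Type} (x : α) (xs : List α) (s : Int) :
    PySem.List.enumerate (x :: xs) s = (s, x) :: PySem.List.enumerate xs (s + 1) := rfl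

lemma pv_enum_append {α : Type} (xs ys : List α) (s : Int) :
    PySem.List.enumerate (xs ++ ys) s
      = PySem.List.enumerate xs s ++ PySem.List.enumerate ys (s + (xs.length : Int)) := by
  induction xs generalizing s with
  | nil => simp [PySem.List.enumerate]
  | cons x t ih =>
      rw [List.cons_append, pv_enum_cons, pv_enum_cons, ih (s := s + 1)]
      have h : s + 1 + (t.length : Int) = s + ((x :: t).length : Int) := by
        simp only [List.length_cons]; push_cast; ring
      rw [h, List.cons_append]

lemma pv_enum_shift {α : Type} (xs : List α) (s d : Int) :
    PySem.List.enumerate xs (s + d)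
      = (PySem.List.enumerate xs s).map (fun p => (p.1 + d, p.2)) := by
  induction xs generalizing s with
  | nil => simp [PySem.List.enumerate]
  | cons x t ih =>
      simp only [pv_enum_cons, List.map_cons]
      have h : s + d + 1 = s + 1 + d := by ring
      rw [h, ih (s := s + 1)]

lemma pv_enum_fst_bound {α : Type} (xs : List α) (s : Int) :
    ∀ p ∈ PySem.List.enumerate xs s, s ≤ p.1 ∧ p.1 < s + (xs.length : Int) := by
  induction xs generalizing s with
  | nil => simp [PySem.List.enumerate]
  | cons x t ih =>
      intro p hp
      rw [pv_enum_cons] at hp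
      rcases List.mem_cons.mp hp with h | h
      · subst h
        simp only [List.length_cons]
        push_cast
        have : (0 : Int) ≤ (t.length : Int) := by positivity
        constructor
        · exact le_refl _
        · omega
      · have h2 := ih (s + 1) p h
        simp only [List.length_cons]
        push_cast
        omega

lemma pv_enum_snd {α : Type} (xs : List α) (s : Int) :
    (PySem.List.enumerate xs s).map Prod.snd = xs := by
  induction xs generalizing s with
  | nil => simp [PySem.List.enumerate]
  | cons x t ih => rw [pv_enum_cons]; simp [ih]

lemma pv_enum_fst_nodup {α : Type} (xs : List α) (s : Int) :
    ((PySem.List.enumerate xs s).map Prod.fst).Nodup := by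
  induction xs generalizing s with
  | nil => simp [PySem.List.enumerate]
  | cons x t ih =>
      rw [pv_enum_cons, List.map_cons, List.nodup_cons]
      refine ⟨?_, ih (s + 1)⟩
      intro hmem
      rcases List.mem_map.mp hmem with ⟨p, hp, hps⟩
      have := (pv_enum_fst_bound t (s + 1) p hp).1
      omega

-- ---- generic mk-dict helpers on appended item lists ----
lemma pv_get?_mk_append_none {ν : Type} (l₁ l₂ : List (Int × ν)) (k : Int)
    (h : ∀ p ∈ l₁, p.1 ≠ k) :
    (PySem.Dict.mk (l₁ ++ l₂)).get? k = (PySem.Dict.mk l₂).get? k := by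
  have hf : l₁.find? (fun p => p.1 == k) = none := by
    apply List.find?_eq_none.mpr
    intro p hp
    simpa using h p hp
  simp [PySem.Dict.get?, List.find?_append, hf]

lemma pv_contains_mk_append {ν : Type} (l₁ l₂ : List (Int × ν)) (k : Int) :
    (PySem.Dict.mk (l₁ ++ l₂)).contains k
      = ((PySem.Dict.mk l₁).contains k || (PySem.Dict.mk l₂).contains k) := by
  simp [PySem.Dict.contains, List.any_append]

lemma pv_contains_mk_false {ν : Type} (l : List (Int × ν)) (k : Int)
    (h : ∀ p ∈ l, p.1 ≠ k) : (PySem.Dict.mk l).contains k = false := by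
  simp only [PySem.Dict.contains, List.any_eq_false]
  intro p hp
  simpa using h p hp

lemma pv_map_keyrepl_id {ν : Type} (l : List (Int × ν)) (k : Int) (v : ν)
    (h : ∀ p ∈ l, p.1 ≠ k) :
    l.map (fun p => if p.1 == k then (k, v) else p) = l := by
  have h2 : l.map (fun p => if p.1 == k then (k, v) else p) = l.map id := by
    apply List.map_congr_left
    intro p hp
    simp [h p hp]
  rw [h2, List.map_id]

-- ---- pvMapF / pvPos facts ----
lemma pv_mapF_cons (c0 k : Int) (ks : List Int) :
    pvMapF c0 (k :: ks) = (k, c0) :: pvMapF (c0 + 1) ks := by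
  unfold pvMapF
  rw [pv_enum_cons]
  simp only [List.map_cons]
  congr 1
  · simp
  · rw [pv_enum_shift ks 0 1, List.map_map]
    apply List.map_congr_left
    intro p _
    simp
    ring

lemma pv_mapF_append (c0 : Int) (ks : List Int) (k : Int) :
    pvMapF c0 (ks ++ [k]) = pvMapF c0 ks ++ [(k, c0 + (ks.length : Int))] := by
  unfold pvMapF
  rw [pv_enum_append]
  simp [pv_enum_cons]

lemma pv_numL_append (c0 : Int) (L : List (Int × List Int)) (q : Int × List Int) :
    pvNumL c0 (L ++ [q]) = pvNumL c0 L ++ [(c0 + (L.length : Int), q.2)] := by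
  unfold pvNumL
  rw [List.map_append, pv_enum_append]
  simp [pv_enum_cons]

lemma pv_get?_mapF (c0 : Int) (ks : List Int) (pool : Int) :
    (PySem.Dict.mk (pvMapF c0 ks)).get? pool
      = (pvPos ks pool).map (fun j => c0 + (j : Int)) := by
  induction ks generalizing c0 with
  | nil => simp [pvMapF, pvPos, PySem.List.enumerate, PySem.Dict.get?]
  | cons k t ih =>
      rw [pv_mapF_cons, PySem.Dict.get?_mk_cons]
      by_cases h : k = pool
      · simp [pvPos, h]
      · have hb : (k == pool) = false := by simpa using h
        simp only [pvPos, hb, Bool.false_eq_true, if_false, if_neg h, ih (c0 + 1)]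
        cases pvPos t pool with
        | none => simp
        | some j => simp; push_cast; ring

lemma pv_pos_none_iff (ks : List Int) (pool : Int) :
    pvPos ks pool = none ↔ pool ∉ ks := by
  induction ks with
  | nil => simp [pvPos]
  | cons k t ih =>
      unfold pvPos
      by_cases h : k = pool
      · simp [h]
      · rw [if_neg h]
        simp only [Option.map_eq_none_iff, ih, List.mem_cons]
        push_neg
        constructor
        · intro hn
          exact ⟨fun hc => h hc.symm, hn⟩
        · intro hn
          exact hn.2

lemma pv_pos_some_mem (ks : List Int) (pool : Int) (j : Nat)
    (h : pvPos ks pool = some j) : pool ∈ ks := by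
  by_contra hm
  rw [← pv_pos_none_iff] at hm
  rw [hm] at h
  simp at h

lemma pv_pos_append_left (ks ext : List Int) (pool : Int) (j : Nat)
    (h : pvPos ks pool = some j) : pvPos (ks ++ ext) pool = some j := by
  induction ks generalizing j with
  | nil => simp [pvPos] at h
  | cons k t ih =>
      rw [List.cons_append]
      unfold pvPos at h ⊢
      by_cases hk : k = pool
      · simpa [hk] using h
      · rw [if_neg hk] at h ⊢
        rcases Option.map_eq_some_iff.mp h with ⟨j', hj', hjj⟩
        rw [ih j' hj']
        simp [hjj]

lemma pv_pos_append_self (ks : List Int) (pool : Int) (h : pool ∉ ks) :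
    pvPos (ks ++ [pool]) pool = some ks.length := by
  induction ks with
  | nil => simp [pvPos]
  | cons k t ih =>
      have hk : k ≠ pool := by
        intro hkp; exact h (by simp [hkp])
      have ht : pool ∉ t := fun hm => h (List.mem_cons_of_mem _ hm)
      rw [List.cons_append]
      unfold pvPos
      simp [hk, ih ht]

-- ---- pvUpdL / pvGrpL facts ----
lemma pv_updL_fst_mem (L : List (Int × List Int)) (pool pol : Int)
    (h : pool ∈ L.map Prod.fst) :
    (pvUpdL L pool pol).map Prod.fst = L.map Prod.fst := by
  unfold pvUpdL
  rw [if_pos h, List.map_map]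
  apply List.map_congr_left
  intro p _
  by_cases hp : p.1 = pool <;> simp [hp]

lemma pv_updL_fst_notmem (L : List (Int × List Int)) (pool pol : Int)
    (h : pool ∉ L.map Prod.fst) :
    (pvUpdL L pool pol).map Prod.fst = L.map Prod.fst ++ [pool] := by
  unfold pvUpdL
  rw [if_neg h, List.map_append]
  rfl

lemma pv_updL_len_mem (L : List (Int × List Int)) (pool pol : Int)
    (h : pool ∈ L.map Prod.fst) : (pvUpdL L pool pol).length = L.length := by
  unfold pvUpdL
  rw [if_pos h, List.length_map]

lemma pv_updL_len_notmem (L : List (Int × List Int)) (pool pol : Int)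
    (h : pool ∉ L.map Prod.fst) : (pvUpdL L pool pol).length = L.length + 1 := by
  unfold pvUpdL
  rw [if_neg h, List.length_append, List.length_cons, List.length_nil]

lemma pv_updL_nodup (L : List (Int × List Int)) (pool pol : Int)
    (h : (L.map Prod.fst).Nodup) : ((pvUpdL L pool pol).map Prod.fst).Nodup := by
  by_cases hm : pool ∈ L.map Prod.fst
  · rw [pv_updL_fst_mem L pool pol hm]; exact h
  · rw [pv_updL_fst_notmem L pool pol hm]
    exact List.Nodup.append h (List.nodup_singleton pool)
      (by simpa [List.disjoint_singleton] using hm)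

lemma pv_grpL_fst (es : List (Int × Option Int)) (L : List (Int × List Int)) :
    ∃ ext, (pvGrpL L es).map Prod.fst = L.map Prod.fst ++ ext := by
  induction es generalizing L with
  | nil => exact ⟨[], by simp [pvGrpL]⟩
  | cons e t ih =>
      obtain ⟨pol, op⟩ := e
      cases op with
      | none =>
          rcases ih L with ⟨ext, hext⟩
          exact ⟨ext, by simpa [pvGrpL] using hext⟩
      | some pool =>
          rcases ih (pvUpdL L pool pol) with ⟨ext, hext⟩
          have hstep : pvGrpL L ((pol, some pool) :: t) = pvGrpL (pvUpdL L pool pol) t := rfl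
          by_cases hm : pool ∈ L.map Prod.fst
          · exact ⟨ext, by rw [hstep, hext, pv_updL_fst_mem L pool pol hm]⟩
          · exact ⟨[pool] ++ ext, by
              rw [hstep, hext, pv_updL_fst_notmem L pool pol hm, List.append_assoc]⟩

lemma pv_grpL_nodup (es : List (Int × Option Int)) (L : List (Int × List Int))
    (h : (L.map Prod.fst).Nodup) : ((pvGrpL L es).map Prod.fst).Nodup := by
  induction es generalizing L with
  | nil => simpa [pvGrpL] using h
  | cons e t ih =>
      obtain ⟨pol, op⟩ := e
      cases op with
      | none => exact ih L h
      | some pool => exact ih (pvUpdL L pool pol) (pv_updL_nodup L pool pol h)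

-- ---- the two pool-dict update shapes of A ----
lemma pv_numL_key_lt (c0 : Int) (L : List (Int × List Int)) :
    ∀ p ∈ pvNumL c0 L, c0 ≤ p.1 ∧ p.1 < c0 + (L.length : Int) := by
  intro p hp
  have := pv_enum_fst_bound (L.map Prod.snd) c0 p hp
  simpa using this

lemma pv_fresh (X L : List (Int × List Int)) (c0 pool pol : Int)
    (hX : ∀ p ∈ X, p.1 < c0) :
    ((PySem.Dict.mk (X ++ pvNumL c0 L)).insert (c0 + (L.length : Int)) []).modify
        (c0 + (L.length : Int)) [] (fun l => l ++ [pol])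
      = PySem.Dict.mk (X ++ pvNumL c0 (L ++ [(pool, [pol])])) := by
  have hkey : ∀ p ∈ X ++ pvNumL c0 L, p.1 ≠ c0 + (L.length : Int) := by
    intro p hp
    rcases List.mem_append.mp hp with h | h
    · have h1 := hX p h
      have hnn : (0 : Int) ≤ (L.length : Int) := by positivity
      omega
    · have h2 := (pv_numL_key_lt c0 L p h).2
      omega
  have hc : (PySem.Dict.mk (X ++ pvNumL c0 L)).contains (c0 + (L.length : Int)) = false :=
    pv_contains_mk_false _ _ hkey
  have hins : (PySem.Dict.mk (X ++ pvNumL c0 L)).insert (c0 + (L.length : Int)) []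
      = PySem.Dict.mk ((X ++ pvNumL c0 L) ++ [(c0 + (L.length : Int), ([] : List Int))]) := by
    apply PySem.Dict.ext
    rw [PySem.Dict.items_insert, hc]
    simp
  rw [hins]
  unfold PySem.Dict.modify
  have hget : (PySem.Dict.mk ((X ++ pvNumL c0 L) ++ [(c0 + (L.length : Int), ([] : List Int))])).getD
      (c0 + (L.length : Int)) [] = [] := by
    rw [PySem.Dict.getD_eq_get?_getD, pv_get?_mk_append_none _ _ _ hkey]
    simp [PySem.Dict.get?]
  rw [hget]
  have hc2 : (PySem.Dict.mk ((X ++ pvNumL c0 L) ++ [(c0 + (L.length : Int), ([] : List Int))])).contains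
      (c0 + (L.length : Int)) = true := by
    rw [pv_contains_mk_append]
    simp [PySem.Dict.contains]
  apply PySem.Dict.ext
  rw [PySem.Dict.items_insert, hc2]
  show (((X ++ pvNumL c0 L) ++ [(c0 + (L.length : Int), ([] : List Int))]).map _) = _
  rw [List.map_append, pv_map_keyrepl_id _ _ _ hkey]
  rw [pv_numL_append]
  simp [List.append_assoc]

lemma pv_found : ∀ (L : List (Int × List Int)) (c0 pool pol : Int) (j : Nat),
    (L.map Prod.fst).Nodup → pvPos (L.map Prod.fst) pool = some j →
    ∀ (X : List (Int × List Int)), (∀ p ∈ X, p.1 < c0) →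
    (PySem.Dict.mk (X ++ pvNumL c0 L)).modify (c0 + (j : Int)) [] (fun l => l ++ [pol])
      = PySem.Dict.mk (X ++ pvNumL c0 (pvUpdL L pool pol)) := by
  intro L
  induction L with
  | nil => intro c0 pool pol j _ hj; simp [pvPos] at hj
  | cons q t ih =>
      intro c0 pool pol j hnd hj X hX
      have hmem : pool ∈ (q :: t).map Prod.fst :=
        pv_pos_some_mem _ _ _ hj
      rw [List.map_cons, List.nodup_cons] at hnd
      rw [List.map_cons] at hj
      by_cases hq : q.1 = pool
      · -- the head is pool's group: j = 0, key = c0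
        have hj0 : j = 0 := by
          unfold pvPos at hj
          rw [if_pos hq] at hj
          exact (Option.some.inj hj).symm
        subst hj0
        have hkey : ∀ p ∈ X, p.1 ≠ c0 + ((0 : Nat) : Int) := by
          intro p hp
          have := hX p hp
          push_cast
          omega
        have hnum : pvNumL c0 (q :: t) = (c0, q.2) :: pvNumL (c0 + 1) t := rfl
        unfold PySem.Dict.modify
        have hget : (PySem.Dict.mk (X ++ pvNumL c0 (q :: t))).getD (c0 + ((0 : Nat) : Int)) [] = q.2 := by
          rw [PySem.Dict.getD_eq_get?_getD, pv_get?_mk_append_none _ _ _ hkey, hnum]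
          rw [PySem.Dict.get?_mk_cons]
          simp
        rw [hget]
        have hc : (PySem.Dict.mk (X ++ pvNumL c0 (q :: t))).contains (c0 + ((0 : Nat) : Int)) = true := by
          rw [pv_contains_mk_append, hnum]
          simp [PySem.Dict.contains]
        apply PySem.Dict.ext
        rw [PySem.Dict.items_insert, hc]
        show ((X ++ pvNumL c0 (q :: t)).map _) = _
        rw [List.map_append, pv_map_keyrepl_id _ _ _ hkey, hnum]
        have hupd : pvUpdL (q :: t) pool pol = (q.1, q.2 ++ [pol]) :: t := by
          unfold pvUpdL
          rw [if_pos hmem, List.map_cons, if_pos hq]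
          congr 1
          have hnp : ∀ p ∈ t, ¬ (p.1 = pool) := by
            intro p hp hpe
            exact hnd.1 (hq ▸ hpe ▸ List.mem_map_of_mem hp)
          have h2 : t.map (fun p => if p.1 = pool then (p.1, p.2 ++ [pol]) else p) = t.map id := by
            apply List.map_congr_left
            intro p hp
            simp [hnp p hp]
          rw [h2, List.map_id]
        rw [hupd]
        have hnum2 : pvNumL c0 ((q.1, q.2 ++ [pol]) :: t) = (c0, q.2 ++ [pol]) :: pvNumL (c0 + 1) t := rfl
        rw [hnum2, List.map_cons]
        have hhead : (if (((c0, q.2) : Int × List Int)).1 == c0 + ((0 : Nat) : Int) then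
            (c0 + ((0 : Nat) : Int), q.2 ++ [pol]) else ((c0, q.2) : Int × List Int))
            = (c0, q.2 ++ [pol]) := by
          simp
        rw [hhead]
        have htail : (pvNumL (c0 + 1) t).map
            (fun p => if p.1 == c0 + ((0 : Nat) : Int) then (c0 + ((0 : Nat) : Int), q.2 ++ [pol]) else p)
            = pvNumL (c0 + 1) t := by
          apply pv_map_keyrepl_id
          intro p hp
          have := (pv_numL_key_lt (c0 + 1) t p hp).1
          push_cast
          omega
        rw [htail]
      · -- the head is a different group: recurse with X ++ [(c0, q.2)]
        have hjs : ∃ j', pvPos (t.map Prod.fst) pool = some j' ∧ j = j' + 1 := by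
          unfold pvPos at hj
          rw [if_neg hq] at hj
          rcases Option.map_eq_some_iff.mp hj with ⟨j', hj', hjj⟩
          exact ⟨j', hj', hjj.symm⟩
        rcases hjs with ⟨j', hj', rfl⟩
        have hmt : pool ∈ t.map Prod.fst := pv_pos_some_mem _ _ _ hj'
        have hX' : ∀ p ∈ X ++ [(c0, q.2)], p.1 < c0 + 1 := by
          intro p hp
          rcases List.mem_append.mp hp with h | h
          · have := hX p h; omega
          · rcases List.mem_singleton.mp h with rfl; simp
        have hkeycast : c0 + ((j' + 1 : Nat) : Int) = (c0 + 1) + (j' : Int) := by push_cast; ring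
        have hassoc : X ++ pvNumL c0 (q :: t) = (X ++ [(c0, q.2)]) ++ pvNumL (c0 + 1) t := by
          rw [List.append_assoc]
          rfl
        rw [hassoc, hkeycast, ih (c0 + 1) pool pol j' hnd.2 hj' (X ++ [(c0, q.2)]) hX']
        have hupd : pvUpdL (q :: t) pool pol = q :: pvUpdL t pool pol := by
          unfold pvUpdL
          rw [if_pos hmem, if_pos hmt, List.map_cons, if_neg hq]
        rw [hupd]
        have hnum3 : pvNumL c0 (q :: pvUpdL t pool pol)
            = (c0, q.2) :: pvNumL (c0 + 1) (pvUpdL t pool pol) := rfl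
        rw [hnum3]
        rw [List.append_assoc]
        rfl

lemma pv_insert_mapF (c0 : Int) (ks : List Int) (pool : Int) (h : pool ∉ ks) :
    (PySem.Dict.mk (pvMapF c0 ks)).insert pool (c0 + (ks.length : Int))
      = PySem.Dict.mk (pvMapF c0 (ks ++ [pool])) := by
  have hc : (PySem.Dict.mk (pvMapF c0 ks)).contains pool = false := by
    rw [PySem.Dict.contains_eq_isSome_get?, pv_get?_mapF, (pv_pos_none_iff ks pool).mpr h]
    rfl
  apply PySem.Dict.ext
  rw [PySem.Dict.items_insert, hc]
  simp [pv_mapF_append]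

-- ---- main inner-loop characterisation ----
lemma pv_inner : ∀ (es : List (Int × Option Int)) (Q : PySem.Dict Int Int)
    (c0 : Int) (X L : List (Int × List Int)),
    (∀ p ∈ X, p.1 < c0) → (L.map Prod.fst).Nodup →
    es.foldl pvStepA
      (PySem.Dict.mk (X ++ pvNumL c0 L), Q, c0 + (L.length : Int),
        PySem.Dict.mk (pvMapF c0 (L.map Prod.fst)))
    = (PySem.Dict.mk (X ++ pvNumL c0 (pvGrpL L es)),
       pvPolUpdL (pvMapF c0 ((pvGrpL L es).map Prod.fst)) Q es,
       c0 + ((pvGrpL L es).length : Int),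
       PySem.Dict.mk (pvMapF c0 ((pvGrpL L es).map Prod.fst))) := by
  intro es
  induction es with
  | nil =>
      intro Q c0 X L hX hnd
      simp [pvGrpL, pvPolUpdL]
  | cons e t ih =>
      intro Q c0 X L hX hnd
      obtain ⟨pol, op⟩ := e
      rw [List.foldl_cons]
      cases op with
      | none =>
          have hstep : pvStepA
              (PySem.Dict.mk (X ++ pvNumL c0 L), Q, c0 + (L.length : Int),
                PySem.Dict.mk (pvMapF c0 (L.map Prod.fst))) (pol, none)
              = (PySem.Dict.mk (X ++ pvNumL c0 L), Q, c0 + (L.length : Int),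
                PySem.Dict.mk (pvMapF c0 (L.map Prod.fst))) := rfl
          rw [hstep]
          have hg : pvGrpL L ((pol, none) :: t) = pvGrpL L t := rfl
          have hp : ∀ m, pvPolUpdL m Q ((pol, none) :: t) = pvPolUpdL m Q t := fun m => rfl
          rw [hg, hp]
          exact ih Q c0 X L hX hnd
      | some pool =>
          cases hpos : pvPos (L.map Prod.fst) pool with
          | some j =>
              have hget : (PySem.Dict.mk (pvMapF c0 (L.map Prod.fst))).get? pool
                  = some (c0 + (j : Int)) := by
                rw [pv_get?_mapF, hpos]
                rfl
              have hstep : pvStepA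
                  (PySem.Dict.mk (X ++ pvNumL c0 L), Q, c0 + (L.length : Int),
                    PySem.Dict.mk (pvMapF c0 (L.map Prod.fst))) (pol, some pool)
                  = ((PySem.Dict.mk (X ++ pvNumL c0 L)).modify (c0 + (j : Int)) [] (fun l => l ++ [pol]),
                     Q.insert pol (c0 + (j : Int)), c0 + (L.length : Int),
                     PySem.Dict.mk (pvMapF c0 (L.map Prod.fst))) := by
                show (match (PySem.Dict.mk (pvMapF c0 (L.map Prod.fst))).get? pool with
                  | some agg =>
                      ((PySem.Dict.mk (X ++ pvNumL c0 L)).modify agg [] (fun l => l ++ [pol]),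
                       Q.insert pol agg, c0 + (L.length : Int),
                       PySem.Dict.mk (pvMapF c0 (L.map Prod.fst)))
                  | none =>
                      (((PySem.Dict.mk (X ++ pvNumL c0 L)).insert (c0 + (L.length : Int)) []).modify
                          (c0 + (L.length : Int)) [] (fun l => l ++ [pol]),
                       Q.insert pol (c0 + (L.length : Int)), c0 + (L.length : Int) + 1,
                       (PySem.Dict.mk (pvMapF c0 (L.map Prod.fst))).insert pool (c0 + (L.length : Int)))) = _
                rw [hget]
              rw [hstep, pv_found L c0 pool pol j hnd hpos X hX]
              have hmem : pool ∈ L.map Prod.fst := pv_pos_some_mem _ _ _ hpos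
              have hfst := pv_updL_fst_mem L pool pol hmem
              have hlen := pv_updL_len_mem L pool pol hmem
              have hih := ih (Q.insert pol (c0 + (j : Int))) c0 X (pvUpdL L pool pol) hX
                (pv_updL_nodup L pool pol hnd)
              rw [hfst, hlen] at hih
              rw [hih]
              have hg : pvGrpL L ((pol, some pool) :: t) = pvGrpL (pvUpdL L pool pol) t := rfl
              rw [hg]
              rcases pv_grpL_fst t (pvUpdL L pool pol) with ⟨ext, hext⟩
              have hgd : (PySem.Dict.mk (pvMapF c0 ((pvGrpL (pvUpdL L pool pol) t).map Prod.fst))).getD pool 0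
                  = c0 + (j : Int) := by
                rw [PySem.Dict.getD_eq_get?_getD, pv_get?_mapF, hext, hfst,
                  pv_pos_append_left _ _ _ _ hpos]
                rfl
              have hpu : pvPolUpdL (pvMapF c0 ((pvGrpL (pvUpdL L pool pol) t).map Prod.fst)) Q
                  ((pol, some pool) :: t)
                  = pvPolUpdL (pvMapF c0 ((pvGrpL (pvUpdL L pool pol) t).map Prod.fst))
                      (Q.insert pol
                        ((PySem.Dict.mk (pvMapF c0 ((pvGrpL (pvUpdL L pool pol) t).map Prod.fst))).getD pool 0))
                      t := rfl
              rw [hpu, hgd]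
          | none =>
              have hget : (PySem.Dict.mk (pvMapF c0 (L.map Prod.fst))).get? pool = none := by
                rw [pv_get?_mapF, hpos]
                rfl
              have hmem : pool ∉ L.map Prod.fst := (pv_pos_none_iff _ _).mp hpos
              have hstep : pvStepA
                  (PySem.Dict.mk (X ++ pvNumL c0 L), Q, c0 + (L.length : Int),
                    PySem.Dict.mk (pvMapF c0 (L.map Prod.fst))) (pol, some pool)
                  = (((PySem.Dict.mk (X ++ pvNumL c0 L)).insert (c0 + (L.length : Int)) []).modify
                        (c0 + (L.length : Int)) [] (fun l => l ++ [pol]),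
                     Q.insert pol (c0 + (L.length : Int)), c0 + (L.length : Int) + 1,
                     (PySem.Dict.mk (pvMapF c0 (L.map Prod.fst))).insert pool (c0 + (L.length : Int))) := by
                show (match (PySem.Dict.mk (pvMapF c0 (L.map Prod.fst))).get? pool with
                  | some agg =>
                      ((PySem.Dict.mk (X ++ pvNumL c0 L)).modify agg [] (fun l => l ++ [pol]),
                       Q.insert pol agg, c0 + (L.length : Int),
                       PySem.Dict.mk (pvMapF c0 (L.map Prod.fst)))
                  | none =>
                      (((PySem.Dict.mk (X ++ pvNumL c0 L)).insert (c0 + (L.length : Int)) []).modify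
                          (c0 + (L.length : Int)) [] (fun l => l ++ [pol]),
                       Q.insert pol (c0 + (L.length : Int)), c0 + (L.length : Int) + 1,
                       (PySem.Dict.mk (pvMapF c0 (L.map Prod.fst))).insert pool (c0 + (L.length : Int)))) = _
                rw [hget]
              rw [hstep, pv_fresh X L c0 pool pol hX]
              have hupd : L ++ [(pool, [pol])] = pvUpdL L pool pol := by
                unfold pvUpdL
                rw [if_neg hmem]
              have hmapins : (PySem.Dict.mk (pvMapF c0 (L.map Prod.fst))).insert pool (c0 + (L.length : Int))
                  = PySem.Dict.mk (pvMapF c0 ((pvUpdL L pool pol).map Prod.fst)) := by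
                have h2 := pv_insert_mapF c0 (L.map Prod.fst) pool hmem
                rw [List.length_map] at h2
                rw [h2, pv_updL_fst_notmem L pool pol hmem]
              have hctr : c0 + (L.length : Int) + 1 = c0 + ((pvUpdL L pool pol).length : Int) := by
                rw [pv_updL_len_notmem L pool pol hmem]
                push_cast
                ring
              rw [hupd, hmapins, hctr]
              have hih := ih (Q.insert pol (c0 + (L.length : Int))) c0 X (pvUpdL L pool pol) hX
                (pv_updL_nodup L pool pol hnd)
              rw [hih]
              have hg : pvGrpL L ((pol, some pool) :: t) = pvGrpL (pvUpdL L pool pol) t := rfl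
              rw [hg]
              rcases pv_grpL_fst t (pvUpdL L pool pol) with ⟨ext, hext⟩
              have hposf : pvPos ((pvGrpL (pvUpdL L pool pol) t).map Prod.fst) pool
                  = some L.length := by
                rw [hext, pv_updL_fst_notmem L pool pol hmem]
                have hself := pv_pos_append_self (L.map Prod.fst) pool hmem
                rw [List.length_map] at hself
                exact pv_pos_append_left _ _ _ _ hself
              have hgd : (PySem.Dict.mk (pvMapF c0 ((pvGrpL (pvUpdL L pool pol) t).map Prod.fst))).getD pool 0
                  = c0 + (L.length : Int) := by
                rw [PySem.Dict.getD_eq_get?_getD, pv_get?_mapF, hposf]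
                rfl
              have hpu : pvPolUpdL (pvMapF c0 ((pvGrpL (pvUpdL L pool pol) t).map Prod.fst)) Q
                  ((pol, some pool) :: t)
                  = pvPolUpdL (pvMapF c0 ((pvGrpL (pvUpdL L pool pol) t).map Prod.fst))
                      (Q.insert pol
                        ((PySem.Dict.mk (pvMapF c0 ((pvGrpL (pvUpdL L pool pol) t).map Prod.fst))).getD pool 0))
                      t := rfl
              rw [hpu, hgd]

-- ---- outer loop of A ----
lemma pv_outer : ∀ (profs : List (Int × List (Int × Option Int)))
    (X : List (Int × List Int)) (Q : PySem.Dict Int Int) (c0 : Int),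
    (∀ p ∈ X, p.1 < c0) →
    profs.foldl
      (fun (st : PySem.Dict Int (List Int) × PySem.Dict Int Int × Int) kv =>
        let r := kv.2.foldl pvStepA (st.1, st.2.1, st.2.2, PySem.Dict.empty)
        (r.1, r.2.1, r.2.2.1))
      (PySem.Dict.mk X, Q, c0)
    = (PySem.Dict.mk (X ++ pvPoolsL c0 profs), pvPolAll Q c0 profs, c0 + (pvTot profs : Int)) := by
  intro profs
  induction profs with
  | nil =>
      intro X Q c0 hX
      simp [pvPoolsL, pvPolAll, pvTot]
  | cons kv t ih =>
      intro X Q c0 hX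
      rw [List.foldl_cons]
      have hstart : (PySem.Dict.mk X, Q, c0, (PySem.Dict.empty : PySem.Dict Int Int))
          = (PySem.Dict.mk (X ++ pvNumL c0 []), Q, c0 + (([] : List (Int × List Int)).length : Int),
            PySem.Dict.mk (pvMapF c0 (([] : List (Int × List Int)).map Prod.fst))) := by
        simp [pvNumL, pvMapF, PySem.Dict.empty]
      have hinner := pv_inner kv.2 Q c0 X [] hX (by simp)
      rw [← hstart] at hinner
      show t.foldl
          (fun (st : PySem.Dict Int (List Int) × PySem.Dict Int Int × Int) kv =>
            let r := kv.2.foldl pvStepA (st.1, st.2.1, st.2.2, PySem.Dict.empty)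
            (r.1, r.2.1, r.2.2.1))
          ((kv.2.foldl pvStepA (PySem.Dict.mk X, Q, c0, PySem.Dict.empty)).1,
           (kv.2.foldl pvStepA (PySem.Dict.mk X, Q, c0, PySem.Dict.empty)).2.1,
           (kv.2.foldl pvStepA (PySem.Dict.mk X, Q, c0, PySem.Dict.empty)).2.2.1)
        = _
      simp only [hinner]
      have hXlt : ∀ p ∈ X ++ pvNumL c0 (pvGrpL [] kv.2),
          p.1 < c0 + ((pvGrpL [] kv.2).length : Int) := by
        intro p hp
        rcases List.mem_append.mp hp with h | h
        · have h1 := hX p h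
          have h0 : (0 : Int) ≤ ((pvGrpL [] kv.2).length : Int) := by positivity
          omega
        · exact (pv_numL_key_lt c0 (pvGrpL [] kv.2) p h).2
      rw [ih (X ++ pvNumL c0 (pvGrpL [] kv.2))
        (pvPolUpdL (pvMapF c0 ((pvGrpL [] kv.2).map Prod.fst)) Q kv.2)
        (c0 + ((pvGrpL [] kv.2).length : Int)) hXlt]
      have h1 : (X ++ pvNumL c0 (pvGrpL [] kv.2))
          ++ pvPoolsL (c0 + ((pvGrpL [] kv.2).length : Int)) t
          = X ++ pvPoolsL c0 (kv :: t) := by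
        rw [List.append_assoc]
        simp [pvPoolsL]
      have h2 : pvPolAll (pvPolUpdL (pvMapF c0 ((pvGrpL [] kv.2).map Prod.fst)) Q kv.2)
          (c0 + ((pvGrpL [] kv.2).length : Int)) t = pvPolAll Q c0 (kv :: t) := by
        simp [pvPolAll]
      have h3 : c0 + ((pvGrpL [] kv.2).length : Int) + (pvTot t : Int)
          = c0 + (pvTot (kv :: t) : Int) := by
        have h4 : pvTot (kv :: t) = (pvGrpL [] kv.2).length + pvTot t := rfl
        rw [h4]
        push_cast
        ring
      rw [h1, h2, h3]

-- ---- B-side assembly ----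
lemma pv_items_ofList_of_nodup {ν : Type} (l : List (Int × ν))
    (h : (l.map Prod.fst).Nodup) : (PySem.Dict.ofList l).items = l := by
  have hfresh : ∀ a ∈ l, (PySem.Dict.empty : PySem.Dict Int ν).contains a.1 = false := by
    intro a _
    rfl
  have h2 := PySem.Dict.items_foldl_insert_fresh l Prod.fst Prod.snd PySem.Dict.empty hfresh h
  simpa [PySem.Dict.ofList, PySem.Dict.update] using h2

lemma pv_modify_items (g : PySem.Dict Int (List Int)) (pool pol : Int)
    (h : g.keys.Nodup) :
    (g.modify pool [] (fun l => l ++ [pol])).items = pvUpdL g.items pool pol := by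
  unfold PySem.Dict.modify pvUpdL
  by_cases hm : pool ∈ g.items.map Prod.fst
  · have hc : g.contains pool = true := by
      simp only [PySem.Dict.contains, List.any_eq_true]
      rcases List.mem_map.mp hm with ⟨p, hp, hps⟩
      exact ⟨p, hp, by simp [hps]⟩
    rw [PySem.Dict.items_insert, hc]
    show g.items.map _ = _
    rw [if_pos hm]
    apply List.map_congr_left
    intro p hp
    by_cases hpe : p.1 = pool
    · have hmemit : (pool, p.2) ∈ g.items := by
        have hpp : (pool, p.2) = p := by rw [← hpe]
        rw [hpp]
        exact hp
      have hget : g.getD pool [] = p.2 := PySem.Dict.getD_of_mem_items g hmemit h []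
      simp [hpe, hget]
    · simp [hpe]
  · have hc : g.contains pool = false := by
      simp only [PySem.Dict.contains, List.any_eq_false]
      intro p hp
      simp only [beq_iff_eq]
      intro hpe
      exact hm (hpe ▸ List.mem_map_of_mem hp)
    have hget : g.getD pool [] = [] := by
      rw [PySem.Dict.getD_eq_get?_getD]
      have hf : g.items.find? (fun p => p.1 == pool) = none := by
        apply List.find?_eq_none.mpr
        intro p hp
        simp only [beq_iff_eq]
        intro hpe
        exact hm (hpe ▸ List.mem_map_of_mem hp)
      simp [PySem.Dict.get?, hf]
    rw [PySem.Dict.items_insert, hc]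
    show g.items ++ _ = _
    rw [if_neg hm, hget]
    rfl

lemma pv_groupFold_items : ∀ (es : List (Int × Option Int)) (g : PySem.Dict Int (List Int)),
    g.keys.Nodup →
    (es.foldl (fun g e =>
      match e.2 with
      | none => g
      | some pool_id => g.modify pool_id [] (fun l => l ++ [e.1])) g).items
      = pvGrpL g.items es := by
  intro es
  induction es with
  | nil => intro g h; simp [pvGrpL]
  | cons e t ih =>
      intro g h
      obtain ⟨pol, op⟩ := e
      rw [List.foldl_cons]
      cases op with
      | none =>
          show (t.foldl _ g).items = _
          rw [ih g h]
          rfl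
      | some pool =>
          have hg' : (g.modify pool [] (fun l => l ++ [pol])).items = pvUpdL g.items pool pol :=
            pv_modify_items g pool pol h
          have hnd' : (g.modify pool [] (fun l => l ++ [pol])).keys.Nodup := by
            have hk : (g.modify pool [] (fun l => l ++ [pol])).keys
                = (pvUpdL g.items pool pol).map Prod.fst := by
              show (g.modify pool [] (fun l => l ++ [pol])).items.map Prod.fst = _
              rw [hg']
            rw [hk]
            exact pv_updL_nodup _ _ _ h
          show (t.foldl _ (g.modify pool [] (fun l => l ++ [pol]))).items = _
          rw [ih _ hnd', hg']
          rfl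

lemma pv_groupByPool_items (es : List (Int × Option Int)) :
    (pvGroupByPool es).items = pvGrpL [] es := by
  unfold pvGroupByPool
  exact pv_groupFold_items es PySem.Dict.empty (by simp [PySem.Dict.keys, PySem.Dict.empty])

lemma pv_localToAgg_eq (base : Int) (es : List (Int × Option Int)) :
    pvLocalToAgg base (pvGroupByPool es)
      = PySem.Dict.mk (pvMapF base ((pvGrpL [] es).map Prod.fst)) := by
  unfold pvLocalToAgg
  have hk : (pvGroupByPool es).keys = (pvGrpL [] es).map Prod.fst := by
    show (pvGroupByPool es).items.map Prod.fst = _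
    rw [pv_groupByPool_items]
  rw [hk]
  apply PySem.Dict.ext
  rw [pv_items_ofList_of_nodup]
  · rfl
  · have h2 : (((PySem.List.enumerate ((pvGrpL [] es).map Prod.fst)).map
        (fun p => (p.2, base + p.1))).map Prod.fst) = (pvGrpL [] es).map Prod.fst := by
      simp only [List.map_map, Function.comp_def]
      exact pv_enum_snd _ 0
    rw [h2]
    exact pv_grpL_nodup es [] (by simp)

lemma pv_poolsL_flat : ∀ (profs : List (Int × List (Int × Option Int))) (c0 : Int),
    PySem.List.enumerate ((profs.map (fun kv => pvGroupByPool kv.2)).flatMap (fun g => g.values)) c0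
      = pvPoolsL c0 profs := by
  intro profs
  induction profs with
  | nil => intro c0; simp [pvPoolsL, PySem.List.enumerate]
  | cons kv t ih =>
      intro c0
      rw [List.map_cons, List.flatMap_cons, pv_enum_append]
      have hv : (pvGroupByPool kv.2).values = (pvGrpL [] kv.2).map Prod.snd := by
        show (pvGroupByPool kv.2).items.map Prod.snd = _
        rw [pv_groupByPool_items]
      rw [hv]
      have hlen : ((((pvGrpL [] kv.2).map Prod.snd).length : Nat) : Int)
          = (((pvGrpL [] kv.2).length : Nat) : Int) := by
        rw [List.length_map]
      rw [hlen, ih]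
      rfl

lemma pv_poolsL_fst_bound : ∀ (profs : List (Int × List (Int × Option Int))) (c0 : Int),
    ∀ p ∈ pvPoolsL c0 profs, c0 ≤ p.1 ∧ p.1 < c0 + (pvTot profs : Int) := by
  intro profs
  induction profs with
  | nil => intro c0 p hp; simp [pvPoolsL] at hp
  | cons kv t ih =>
      intro c0 p hp
      have hcons : pvPoolsL c0 (kv :: t)
          = pvNumL c0 (pvGrpL [] kv.2) ++ pvPoolsL (c0 + ((pvGrpL [] kv.2).length : Int)) t := rfl
      rw [hcons] at hp
      have htot : (pvTot (kv :: t) : Int) = ((pvGrpL [] kv.2).length : Int) + (pvTot t : Int) := by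
        have h4 : pvTot (kv :: t) = (pvGrpL [] kv.2).length + pvTot t := rfl
        rw [h4]
        push_cast
        ring
      rcases List.mem_append.mp hp with h | h
      · have hb := pv_numL_key_lt c0 _ p h
        have h0 : (0 : Int) ≤ (pvTot t : Int) := by positivity
        constructor
        · exact hb.1
        · rw [htot]
          linarith [hb.2]
      · have hb := ih (c0 + ((pvGrpL [] kv.2).length : Int)) p h
        have h0 : (0 : Int) ≤ ((pvGrpL [] kv.2).length : Int) := by positivity
        constructor
        · linarith [hb.1]
        · rw [htot]
          linarith [hb.2]

lemma pv_poolsL_nodup : ∀ (profs : List (Int × List (Int × Option Int))) (c0 : Int),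
    ((pvPoolsL c0 profs).map Prod.fst).Nodup := by
  intro profs
  induction profs with
  | nil => intro c0; simp [pvPoolsL]
  | cons kv t ih =>
      intro c0
      have hcons : pvPoolsL c0 (kv :: t)
          = pvNumL c0 (pvGrpL [] kv.2) ++ pvPoolsL (c0 + ((pvGrpL [] kv.2).length : Int)) t := rfl
      rw [hcons, List.map_append]
      have hdisj : List.Disjoint ((pvNumL c0 (pvGrpL [] kv.2)).map Prod.fst)
          ((pvPoolsL (c0 + ((pvGrpL [] kv.2).length : Int)) t).map Prod.fst) := by
        intro a ha hb
        rcases List.mem_map.mp ha with ⟨p, hp, hpa⟩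
        rcases List.mem_map.mp hb with ⟨q, hq, hqa⟩
        have h1 := (pv_numL_key_lt c0 _ p hp).2
        have h2 := (pv_poolsL_fst_bound t _ q hq).1
        rw [hpa] at h1
        rw [hqa] at h2
        omega
      exact List.Nodup.append (pv_enum_fst_nodup _ c0) (ih _) hdisj

lemma pv_polB : ∀ (profs : List (Int × List (Int × Option Int))) (Q : PySem.Dict Int Int) (c0 : Int),
    (((profs.map (fun kv => kv.2)).zip (profs.map (fun kv => pvGroupByPool kv.2))).foldl
      (fun (st : PySem.Dict Int Int × Int) pg =>
        let m := pvLocalToAgg st.2 pg.2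
        (pg.1.foldl (fun q e =>
           match e.2 with
           | none => q
           | some pool_id => q.insert e.1 (m.getD pool_id 0)) st.1,
         st.2 + (pg.2.size : Int)))
      (Q, c0)).1
    = pvPolAll Q c0 profs := by
  intro profs
  induction profs with
  | nil => intro Q c0; rfl
  | cons kv t ih =>
      intro Q c0
      rw [List.map_cons, List.map_cons, List.zip_cons_cons, List.foldl_cons]
      show (((t.map (fun kv => kv.2)).zip (t.map (fun kv => pvGroupByPool kv.2))).foldl _
        (kv.2.foldl (fun q e =>
           match e.2 with
           | none => q
           | some pool_id => q.insert e.1 ((pvLocalToAgg c0 (pvGroupByPool kv.2)).getD pool_id 0)) Q,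
         c0 + ((pvGroupByPool kv.2).size : Int))).1 = _
      have hsz : (((pvGroupByPool kv.2).size : Nat) : Int) = (((pvGrpL [] kv.2).length : Nat) : Int) := by
        show (((pvGroupByPool kv.2).items.length : Nat) : Int) = _
        rw [pv_groupByPool_items]
      have hfold : kv.2.foldl (fun q e =>
          match e.2 with
          | none => q
          | some pool_id => q.insert e.1 ((pvLocalToAgg c0 (pvGroupByPool kv.2)).getD pool_id 0)) Q
          = pvPolUpdL (pvMapF c0 ((pvGrpL [] kv.2).map Prod.fst)) Q kv.2 := by
        rw [pv_localToAgg_eq]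
        rfl
      rw [hfold, hsz, ih]
      rfl

-- ===== VERDICT (by name: the statement is the Claim_ definition above) =====
theorem aggregate_pools___py_spec : Claim_equal_aggregate_pools___py := by
  intro pi_policies _
  show aggregate_pools___py pi_policies = aggregate_pools___py_alt pi_policies
  have hA : aggregate_pools___py pi_policies
      = (pvPoolsL 0 pi_policies, (pvPolAll PySem.Dict.empty 0 pi_policies).items) := by
    have h := pv_outer pi_policies [] PySem.Dict.empty 0 (by intro p hp; simp at hp)
    unfold aggregate_pools___py
    show ((pi_policies.foldl
        (fun (st : PySem.Dict Int (List Int) × PySem.Dict Int Int × Int) kv =>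
          let r := kv.2.foldl pvStepA (st.1, st.2.1, st.2.2, PySem.Dict.empty)
          (r.1, r.2.1, r.2.2.1))
        (PySem.Dict.mk [], PySem.Dict.empty, 0)).1.items,
      (pi_policies.foldl
        (fun (st : PySem.Dict Int (List Int) × PySem.Dict Int Int × Int) kv =>
          let r := kv.2.foldl pvStepA (st.1, st.2.1, st.2.2, PySem.Dict.empty)
          (r.1, r.2.1, r.2.2.1))
        (PySem.Dict.mk [], PySem.Dict.empty, 0)).2.1.items) = _
    rw [h]
    simp
  have hB : aggregate_pools___py_alt pi_policies
      = (pvPoolsL 0 pi_policies, (pvPolAll PySem.Dict.empty 0 pi_policies).items) := by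
    unfold aggregate_pools___py_alt
    have h1 : (PySem.Dict.ofList (PySem.List.enumerate
        ((pi_policies.map (fun kv => pvGroupByPool kv.2)).flatMap (fun g => g.values)))).items
        = pvPoolsL 0 pi_policies := by
      rw [pv_items_ofList_of_nodup, pv_poolsL_flat]
      rw [pv_poolsL_flat]
      exact pv_poolsL_nodup pi_policies 0
    have h2 := pv_polB pi_policies PySem.Dict.empty 0
    show ((PySem.Dict.ofList (PySem.List.enumerate
        ((pi_policies.map (fun kv => pvGroupByPool kv.2)).flatMap (fun g => g.values)))).items,
      (((pi_policies.map (fun kv => kv.2)).zip (pi_policies.map (fun kv => pvGroupByPool kv.2))).foldl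
        (fun (st : PySem.Dict Int Int × Int) pg =>
          let m := pvLocalToAgg st.2 pg.2
          (pg.1.foldl (fun q e =>
             match e.2 with
             | none => q
             | some pool_id => q.insert e.1 (m.getD pool_id 0)) st.1,
           st.2 + (pg.2.size : Int)))
        (PySem.Dict.empty, 0)).1.items) = _
    rw [h1, h2]
  rw [hA, hB]
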